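-- pv_equiv track=rewrite | github.com/mihaitopan/MovieRecommenderSystem | application/Controller.py | _hybridise
-- ===== SOURCE A (Python) =====
-- from math import sqrt
--
-- def isPrime(magicNumber):
--     if magicNumber < 2:
--         return False
--     if magicNumber == 2:
--         return True
--     if magicNumber % 2 == 0:
--         return False
--     for number in range(3, int(sqrt(magicNumber)) + 1, 2):
--         if magicNumber % number == 0:
--             return False
--     else:
--         return True
--
-- def _hybridise(noMovies, collaborativeMovies, contentMovies):
--     recommendedMovies = []
--     count = 0
--     while count < noMovies:
--         if count == 0:
--             recommendedMovies.append(contentMovies[0])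
--             contentMovies = contentMovies[1:]
--             count += 1
--         if isPrime(count):
--             recommendedMovies.append(contentMovies[0])
--             contentMovies = contentMovies[1:]
--             count += 1
--             if count < noMovies:
--                 recommendedMovies.append(contentMovies[0])
--                 contentMovies = contentMovies[1:]
--                 count += 1
--         else:
--             recommendedMovies.append(collaborativeMovies[0])
--             collaborativeMovies = collaborativeMovies[1:]
--             count += 1
--     return recommendedMovies
-- ===== SOURCE B (Python) =====
-- from math import isqrt
--
-- def _hybridise(noMovies, collaborativeMovies, contentMovies):
--     # prime table for every count value the loop can test (indices 0..max(noMovies,2)-1)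
--     isp = [False, False] + [all(k % d for d in range(2, isqrt(k) + 1))
--                             for k in range(2, noMovies)]
--     out = []
--     ci = ki = count = 0
--     while count < noMovies:
--         if count == 0:
--             out.append(contentMovies[ci]); ci += 1; count = 1
--         if isp[count]:
--             out.append(contentMovies[ci]); ci += 1; count += 1
--             if count < noMovies:
--                 out.append(contentMovies[ci]); ci += 1; count += 1
--         else:
--             out.append(collaborativeMovies[ki]); ki += 1; count += 1
--     return out
-- ===== Notes on version B (the rewrite author's own statement) =====
-- stated objective: faster
-- what changed: Replaced per-iteration list slicing (xs[1:]) and per-count odd trial division by two index pointers into the untouched lists plus a prime table precomputed once with isqrt trial division; Pre_ excludes exactly the inputs on which A raises IndexError (a list shorter than the consumption count the prime pattern, a function of noMovies alone, demands), and B raises there too.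
import Mathlib
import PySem

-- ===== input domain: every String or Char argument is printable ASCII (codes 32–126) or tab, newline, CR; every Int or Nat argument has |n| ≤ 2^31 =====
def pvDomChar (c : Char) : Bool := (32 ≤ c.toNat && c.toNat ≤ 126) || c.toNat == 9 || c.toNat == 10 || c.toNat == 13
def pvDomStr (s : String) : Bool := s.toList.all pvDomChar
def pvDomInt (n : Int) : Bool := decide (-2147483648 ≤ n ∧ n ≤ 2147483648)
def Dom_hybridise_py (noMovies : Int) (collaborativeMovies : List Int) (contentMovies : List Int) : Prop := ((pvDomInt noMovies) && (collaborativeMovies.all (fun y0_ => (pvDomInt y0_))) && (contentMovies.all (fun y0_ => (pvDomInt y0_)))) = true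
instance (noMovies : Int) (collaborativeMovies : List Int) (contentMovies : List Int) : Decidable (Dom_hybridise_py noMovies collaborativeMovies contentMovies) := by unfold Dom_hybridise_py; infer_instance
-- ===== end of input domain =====

-- B replaces A's per-iteration list slicing and per-count odd trial division by index pointers
-- plus a prime table precomputed once (objective: faster, measured).

-- ===== PORT A =====
-- int(sqrt(m)) / math.isqrt ported by hand (PySem has no isqrt): pvIsqrt n = ⌊√n⌋, exact for
-- every n in the domain (|n| ≤ 2^31, where float sqrt is exact enough that int(sqrt(n)) = isqrt(n)).
def pvIsqrt : Nat → Nat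
  | 0 => 0
  | n + 1 => if (pvIsqrt n + 1) * (pvIsqrt n + 1) ≤ n + 1 then pvIsqrt n + 1 else pvIsqrt n

-- the 'for number in range(3, int(sqrt(m)) + 1, 2): if m % number == 0: return False / else: return True'
def pvTrialA (m : Int) : List Int → Bool
  | [] => true
  | d :: ds => if PySem.Int.mod m d = 0 then false else pvTrialA m ds

def pvIsPrimeA (m : Int) : Bool :=
  if m < 2 then false
  else if m = 2 then true
  else if PySem.Int.mod m 2 = 0 then false
  else pvTrialA m (PySem.List.pyRange 3 ((pvIsqrt m.toNat : Int) + 1) 2)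

-- the while loop of _hybridise; fuel = noMovies.toNat + 1 bounds the iterations (count grows by
-- ≥ 1 each pass), one fuel unit per pass.  xs[0] where Python would raise IndexError is pyGetD 0
-- (excluded by Pre_hybridise_py); xs[1:] is slice.
def pvLoopA (n : Int) : Nat → Int → List Int → List Int → List Int → List Int
  | 0, _, _, _, acc => acc
  | fuel + 1, count, collab, content, acc =>
    if count < n then
      let s := if count = 0 then
          (PySem.List.slice content (some 1) none, acc ++ [PySem.List.pyGetD content 0 0], count + 1)
        else (content, acc, count)
      let content := s.1; let acc := s.2.1; let count := s.2.2
      if pvIsPrimeA count then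
        let acc := acc ++ [PySem.List.pyGetD content 0 0]
        let content := PySem.List.slice content (some 1) none
        let count := count + 1
        if count < n then
          pvLoopA n fuel (count + 1) collab (PySem.List.slice content (some 1) none)
            (acc ++ [PySem.List.pyGetD content 0 0])
        else pvLoopA n fuel count collab content acc
      else
        pvLoopA n fuel (count + 1) (PySem.List.slice collab (some 1) none) content
          (acc ++ [PySem.List.pyGetD collab 0 0])
    else acc

def hybridise_py (noMovies : Int) (collaborativeMovies : List Int) (contentMovies : List Int) : List Int :=
  pvLoopA noMovies (noMovies.toNat + 1) 0 collaborativeMovies contentMovies []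

-- ===== PORT B =====
-- the precomputed table: isp = [False, False] + [all(k % d for d in range(2, isqrt(k)+1)) for k in range(2, noMovies)]
def pvIsp (n : Int) : List Bool :=
  [false, false] ++ (PySem.List.pyRange 2 n 1).map (fun k =>
    (PySem.List.pyRange 2 ((pvIsqrt k.toNat : Int) + 1) 1).all (fun d => decide (PySem.Int.mod k d ≠ 0)))

-- the while loop of B: index pointers ci/ki into the untouched lists, isp[count] for the prime test
def pvLoopB (n : Int) (isp : List Bool) (collab content : List Int) :
    Nat → Int → Int → Int → List Int → List Int
  | 0, _, _, _, acc => acc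
  | fuel + 1, count, ci, ki, acc =>
    if count < n then
      let s := if count = 0 then (acc ++ [PySem.List.pyGetD content ci 0], ci + 1, (1 : Int))
        else (acc, ci, count)
      let acc := s.1; let ci := s.2.1; let count := s.2.2
      if PySem.List.pyGetD isp count false then
        let acc := acc ++ [PySem.List.pyGetD content ci 0]
        let ci := ci + 1
        let count := count + 1
        if count < n then
          pvLoopB n isp collab content fuel (count + 1) (ci + 1) ki
            (acc ++ [PySem.List.pyGetD content ci 0])
        else pvLoopB n isp collab content fuel count ci ki acc
      else
        pvLoopB n isp collab content fuel (count + 1) ci (ki + 1)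
          (acc ++ [PySem.List.pyGetD collab ki 0])
    else acc

def hybridise_py_alt (noMovies : Int) (collaborativeMovies : List Int) (contentMovies : List Int) : List Int :=
  pvLoopB noMovies (pvIsp noMovies) collaborativeMovies contentMovies (noMovies.toNat + 1) 0 0 0 []

-- ===== PRECONDITION & SPEC =====
-- The number of elements the loop consumes from each list is a function of noMovies alone:
-- it appends contentMovies[·] once at count 0 and twice per prime count it visits (once when the
-- second append would overrun noMovies), collaborativeMovies[·] once per visited non-prime count.
-- The visited counts are all c in [1, noMovies) except 3 and the successors of primes ≥ 5
-- (a prime p ≥ 5 makes the loop jump from p to p+2).  pvCC/pvKK state those two counts in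
-- closed form over the primes below noMovies (pvPrimeB = trial-division primality).
def pvPrimeB (c : Nat) : Bool :=
  decide (2 ≤ c) && (List.range (c - 2)).all (fun d => decide (c % (d + 2) ≠ 0))

def pvCC (n : Int) : Nat :=
  if n ≤ 0 then 0 else
  1 + ((List.range n.toNat).map (fun p =>
        if pvPrimeB p ∧ p ≠ 3 then (if p + 1 < n.toNat then 2 else 1) else 0)).sum

def pvKK (n : Int) : Nat :=
  if n ≤ 0 then 0 else if n = 1 then 1 else
  (List.range n.toNat).countP (fun c =>
    decide (1 ≤ c ∧ ¬ pvPrimeB c ∧ ¬ (6 ≤ c ∧ pvPrimeB (c - 1))))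

-- Pre_ excludes exactly the inputs on which A raises IndexError: a content list shorter than the
-- pvCC noMovies elements, or a collaborative list shorter than the pvKK noMovies elements, that the
-- prime pattern consumes (B raises IndexError on exactly the same inputs).  The first conjunct
-- (total consumption pvCC + pvKK is ≥ noMovies) is implied by the other two and only lets the
-- Decidable instance reject huge noMovies without evaluating pvCC/pvKK.
def Pre_hybridise_py (noMovies : Int) (collaborativeMovies : List Int) (contentMovies : List Int) : Prop :=
  noMovies.toNat ≤ contentMovies.length + collaborativeMovies.length ∧
  pvCC noMovies ≤ contentMovies.length ∧ pvKK noMovies ≤ collaborativeMovies.length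
instance (noMovies : Int) (collaborativeMovies : List Int) (contentMovies : List Int) : Decidable (Pre_hybridise_py noMovies collaborativeMovies contentMovies) := by unfold Pre_hybridise_py; infer_instance

def pvWitness_hybridise_py : Int × List Int × List Int := (5, [10, 11, 12, 13, 14], [20, 21, 22, 23, 24])

def Spec_hybridise_py (noMovies : Int) (collaborativeMovies : List Int) (contentMovies : List Int) (out : List Int) : Prop := out = hybridise_py_alt noMovies collaborativeMovies contentMovies
instance (noMovies : Int) (collaborativeMovies : List Int) (contentMovies : List Int) (out : List Int) : Decidable (Spec_hybridise_py noMovies collaborativeMovies contentMovies out) := by unfold Spec_hybridise_py; infer_instance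

-- ===== CLAIM (what is proved, stated in full; the proofs are below) =====
def Claim_equal_hybridise_py : Prop := ∀ (noMovies : Int) (collaborativeMovies : List Int) (contentMovies : List Int), Dom_hybridise_py noMovies collaborativeMovies contentMovies → Pre_hybridise_py noMovies collaborativeMovies contentMovies → Spec_hybridise_py noMovies collaborativeMovies contentMovies (hybridise_py noMovies collaborativeMovies contentMovies)

-- ===== LEMMAS AND PROOFS =====

theorem pvIsqrt_bounds (n : Nat) : pvIsqrt n * pvIsqrt n ≤ n ∧ n < (pvIsqrt n + 1) * (pvIsqrt n + 1) := by
  induction n with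
  | zero => simp [pvIsqrt]
  | succ n ih =>
    unfold pvIsqrt
    split_ifs with h
    · exact ⟨h, by nlinarith [ih.2]⟩
    · exact ⟨Nat.le_succ_of_le ih.1, by omega⟩

theorem pvTrialA_eq_all (m : Int) (ds : List Int) :
    pvTrialA m ds = ds.all (fun d => decide (PySem.Int.mod m d ≠ 0)) := by
  induction ds with
  | nil => rfl
  | cons d ds ih => by_cases h : PySem.Int.mod m d = 0 <;> simp [pvTrialA, h, ih]

theorem primeTest_eq (c : Int) (hc : 2 ≤ c) :
    (PySem.List.pyRange 2 ((pvIsqrt c.toNat : Int) + 1) 1).all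
        (fun d => decide (PySem.Int.mod c d ≠ 0)) = pvIsPrimeA c := by
  have hsq := pvIsqrt_bounds c.toNat
  unfold pvIsPrimeA
  rw [if_neg (by omega)]
  by_cases h2 : c = 2
  · subst h2
    rw [if_pos rfl]
    rw [show (pvIsqrt (Int.toNat 2) : Int) + 1 = 2 from by decide]
    rw [PySem.List.pyRange_one_eq_nil le_rfl]
    rfl
  rw [if_neg h2]
  by_cases heven : PySem.Int.mod c 2 = 0
  · rw [if_pos heven]
    have hdvd : (2 : Int) ∣ c := (PySem.Int.mod_eq_zero_iff_dvd c 2).mp heven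
    have hc4 : 4 ≤ c := by omega
    have hs2 : 2 ≤ pvIsqrt c.toNat := by nlinarith [hsq.2, Int.toNat_of_nonneg (show (0:Int) ≤ c by omega)]
    apply List.all_eq_false.mpr
    refine ⟨2, ?_, by simp [hdvd]⟩
    exact (PySem.List.mem_pyRange_one).mpr ⟨le_rfl, by exact_mod_cast by omega⟩
  · rw [if_neg heven, pvTrialA_eq_all]
    have hodd : ¬ (2 : Int) ∣ c := fun h => heven ((PySem.Int.mod_eq_zero_iff_dvd c 2).mpr h)
    rw [Bool.eq_iff_iff]
    simp only [List.all_eq_true]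
    constructor
    · intro hall d hd
      obtain ⟨h3, hlt, _⟩ := (PySem.List.mem_pyRange_iff_of_pos (by norm_num) d).mp hd
      exact hall d ((PySem.List.mem_pyRange_one).mpr ⟨by omega, hlt⟩)
    · intro hall d hd
      obtain ⟨h2d, hlt⟩ := (PySem.List.mem_pyRange_one).mp hd
      by_cases hpar : (2 : Int) ∣ d
      · simp only [decide_eq_true_eq]
        intro hdc
        exact hodd (dvd_trans hpar ((PySem.Int.mod_eq_zero_iff_dvd c d).mp hdc))
      · exact hall d ((PySem.List.mem_pyRange_iff_of_pos (by norm_num) d).mpr ⟨by omega, hlt, by omega⟩)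

theorem isp_lookup (n c : Int) (h1 : 1 ≤ c) (h2 : c < n ∨ c = 1) :
    PySem.List.pyGetD (pvIsp n) c false = pvIsPrimeA c := by
  have hlen : (pvIsp n).length = 2 + (n - 2).toNat := by
    simp [pvIsp, PySem.List.length_pyRange_one]
    omega
  have hin : c < ((pvIsp n).length : Int) := by rw [hlen]; push_cast; omega
  rw [PySem.List.pyGetD_eq_getElem _ _ (by omega) hin]
  by_cases hc1 : c = 1
  · subst hc1
    rfl
  · have hc2 : 2 ≤ c := by omega
    rw [← primeTest_eq c hc2]
    simp only [pvIsp, PySem.List.pyRange_one]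
    rw [List.getElem_append_right (by simp; omega)]
    simp only [List.getElem_map, List.getElem_range, List.length_cons, List.length_nil]
    have he : (2 : Int) + ((c.toNat - (0 + 1 + 1) : Nat) : Int) = c := by push_cast; omega
    rw [he]

theorem pyGetD_drop_zero (xs : List Int) (i : Int) (hi : 0 ≤ i) :
    PySem.List.pyGetD (xs.drop i.toNat) 0 0 = PySem.List.pyGetD xs i 0 := by
  rw [PySem.List.pyGetD_of_nonneg _ _ le_rfl, PySem.List.pyGetD_of_nonneg _ _ hi]
  simp [List.getD_eq_getElem?_getD, List.getElem?_drop]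

theorem slice_drop (xs : List Int) (i : Int) (hi : 0 ≤ i) :
    PySem.List.slice (xs.drop i.toNat) (some 1) none = xs.drop (i + 1).toNat := by
  rw [PySem.List.slice_from_one, List.tail_drop]
  congr 1
  omega

theorem loopAB (n : Int) (collab content : List Int) :
    ∀ (fuel : Nat) (count ci ki : Int) (acc : List Int), 0 ≤ count → 0 ≤ ci → 0 ≤ ki →
      pvLoopA n fuel count (collab.drop ki.toNat) (content.drop ci.toNat) acc =
        pvLoopB n (pvIsp n) collab content fuel count ci ki acc := by
  intro fuel
  induction fuel with
  | zero => intros; rfl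
  | succ fuel ih =>
    intro count ci ki acc hc hci hki
    by_cases hlt : count < n
    · by_cases h0 : count = 0
      · subst h0
        simp only [pvLoopA, pvLoopB, if_pos hlt]
        simp only [if_true]
        norm_num
        rw [isp_lookup n 1 le_rfl (Or.inr rfl)]
        have hp1 : pvIsPrimeA 1 = false := rfl
        rw [hp1]
        simp only [Bool.false_eq_true, if_false]
        rw [pyGetD_drop_zero content ci hci, slice_drop content ci hci,
            pyGetD_drop_zero collab ki hki, slice_drop collab ki hki]
        exact ih 2 (ci + 1) (ki + 1) _ (by omega) (by omega) (by omega)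
      · simp only [pvLoopA, pvLoopB, if_pos hlt, if_neg h0]
        rw [isp_lookup n count (by omega) (Or.inl hlt)]
        rw [pyGetD_drop_zero content ci hci, slice_drop content ci hci,
            pyGetD_drop_zero content (ci + 1) (by omega), slice_drop content (ci + 1) (by omega),
            pyGetD_drop_zero collab ki hki, slice_drop collab ki hki]
        split_ifs with hp hlt2
        · exact ih _ _ _ _ (by omega) (by omega) hki
        · exact ih _ _ _ _ (by omega) (by omega) hki
        · exact ih _ _ _ _ (by omega) hci (by omega)
    · simp [pvLoopA, pvLoopB, hlt]

-- ===== VERDICT (by name: the statement is the Claim_ definition above) =====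
theorem hybridise_py_spec : Claim_equal_hybridise_py := by
  intro n collab content _hdom _hpre
  unfold Spec_hybridise_py hybridise_py hybridise_py_alt
  have h := loopAB n collab content (n.toNat + 1) 0 0 0 [] le_rfl le_rfl le_rfl
  simpa using h
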